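-- pv_equiv track=rewrite | github.com/LINKS-Foundation-CPE/QC-Gateway | middleware/authorization.py | _path_matches
-- ===== SOURCE A (Python) =====
-- def _path_matches(route_pattern: str, actual_path: str) -> bool:
--     """Match a ROLE_ROUTES pattern against an actual request path.
--
--     - If the configured `route_pattern` contains path parameters in the
--       form `{name}` they match exactly one path segment (no slashes).
--     - Otherwise fall back to the previous `startswith` behaviour so
--       existing prefix-style rules continue to work.
--     Examples:
--       '/api/v1/jobs/{job_id}/cancel' matches '/api/v1/jobs/123/cancel'
--       '/api/v1/jobs' matches '/api/v1/jobs/123/cancel' (prefix)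
--     """
--     # Normalize trailing slashes for comparison
--     rp = route_pattern.rstrip("/")
--     ap = actual_path.rstrip("/")
--
--     # Parameterized pattern: compare segment-by-segment
--     if "{" in rp and "}" in rp:
--         rp_segs = rp.strip("/").split("/") if rp.strip("/") else []
--         ap_segs = ap.strip("/").split("/") if ap.strip("/") else []
--         if len(rp_segs) != len(ap_segs):
--             return False
--         for rseg, aseg in zip(rp_segs, ap_segs, strict=False):
--             if rseg.startswith("{") and rseg.endswith("}"):
--                 # matches any non-empty single segment
--                 if aseg == "":
--                     return False
--                 continue
--             if rseg != aseg:
--                 return False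
--         return True
--
--     # Fallback: keep prefix matching for backwards compatibility
--     return ap.startswith(rp)
-- ===== SOURCE B (Python) =====
-- def _path_matches(route_pattern: str, actual_path: str) -> bool:
--     rp = route_pattern.rstrip("/")
--     ap = actual_path.rstrip("/")
--     if "{" in rp and "}" in rp:
--         r = rp.strip("/")
--         a = ap.strip("/")
--         if r == "" or a == "":
--             return r == a
--         while True:
--             rseg, rsep, r = r.partition("/")
--             aseg, asep, a = a.partition("/")
--             if rseg.startswith("{") and rseg.endswith("}"):
--                 if aseg == "":
--                     return False
--             elif rseg != aseg:
--                 return False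
--             if rsep != asep:
--                 return False
--             if not rsep:
--                 return True
--     return ap.startswith(rp)
-- ===== Notes on version B (the rewrite author's own statement) =====
-- stated objective: alternative
-- what changed: The parameterized branch is replaced by a single-pass two-pointer scanner that peels one segment off each path with str.partition per iteration and compares as it goes, so the pattern and path are never split into lists, never zipped, and there is no up-front length check (a length mismatch surfaces as a separator mismatch during the scan).
import Mathlib
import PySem

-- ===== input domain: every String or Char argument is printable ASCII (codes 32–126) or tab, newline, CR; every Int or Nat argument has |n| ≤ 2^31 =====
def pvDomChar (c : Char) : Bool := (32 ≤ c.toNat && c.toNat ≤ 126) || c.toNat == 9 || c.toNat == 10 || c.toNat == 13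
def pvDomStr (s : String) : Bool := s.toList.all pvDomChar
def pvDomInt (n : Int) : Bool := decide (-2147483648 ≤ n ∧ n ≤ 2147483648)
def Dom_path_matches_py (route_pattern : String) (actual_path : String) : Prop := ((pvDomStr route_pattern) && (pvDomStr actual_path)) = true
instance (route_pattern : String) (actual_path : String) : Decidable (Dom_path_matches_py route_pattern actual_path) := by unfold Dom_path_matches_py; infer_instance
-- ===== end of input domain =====

-- B replaces A's split-both/length-check/zip-loop parameterized branch by a single-pass
-- two-pointer scanner that peels one segment off each path per step with str.partition.


-- ===== PORT A =====
-- s.rstrip("/"): exact hand port (PySem has stripChars only for both-sided strip)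
def pvRstripSlash (l : List Char) : List Char :=
  (l.reverse.dropWhile (fun c => c == '/')).reverse

-- rp.strip("/").split("/") if rp.strip("/") else []
def pvSegs (l : List Char) : List (List Char) :=
  let s := PySem.Chars.stripChars l ['/']
  if s = [] then [] else PySem.Chars.splitOn s ['/']

-- A's for-loop over zip(rp_segs, ap_segs) with its early returns
def pvALoop : List (List Char × List Char) → Bool
  | [] => true
  | (rseg, aseg) :: rest =>
    if PySem.Chars.startswith rseg ['{'] && PySem.Chars.endswith rseg ['}'] then
      if aseg = [] then false else pvALoop rest
    else if rseg ≠ aseg then false else pvALoop rest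

def path_matches_py (route_pattern : String) (actual_path : String) : Bool :=
  let rp := pvRstripSlash route_pattern.toList
  let ap := pvRstripSlash actual_path.toList
  if PySem.Chars.isIn ['{'] rp && PySem.Chars.isIn ['}'] rp then
    let rp_segs := pvSegs rp
    let ap_segs := pvSegs ap
    if rp_segs.length ≠ ap_segs.length then false
    else pvALoop (rp_segs.zip ap_segs)
  else PySem.Chars.startswith ap rp

-- ===== PORT B =====
-- s.partition("/"): exact hand port for the single-character separator "/"
-- (PySem has no partition; Python returns the part before the FIRST "/", the
-- separator itself, and the rest — or (s, "", "") when "/" does not occur).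
def pvPartSlash (l : List Char) : List Char × List Char × List Char :=
  if '/' ∈ l then (l.takeWhile (fun c => c ≠ '/'), ['/'], (l.dropWhile (fun c => c ≠ '/')).tail)
  else (l, [], [])

-- termination helper for the scanner (cited by decreasing_by)
theorem pvDropTail_lt (l : List Char) (h : '/' ∈ l) :
    ((l.dropWhile (fun c => c ≠ '/')).tail).length < l.length := by
  have hne : l.dropWhile (fun c => c ≠ '/') ≠ [] := by
    intro hnil
    have := List.dropWhile_eq_nil_iff.mp hnil '/' h
    simp at this
  have hle := List.length_dropWhile_le (fun c => c ≠ '/') l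
  cases hd : l.dropWhile (fun c => c ≠ '/') with
  | nil => exact absurd hd hne
  | cons c t => rw [hd] at hle; simp at hle ⊢; omega

-- B's while-loop: peel one segment off each side per iteration and compare
def pvScan (r a : List Char) : Bool :=
  let p := pvPartSlash r
  let q := pvPartSlash a
  if (if PySem.Chars.startswith p.1 ['{'] && PySem.Chars.endswith p.1 ['}']
      then q.1 = [] else p.1 ≠ q.1) then false
  else if p.2.1 ≠ q.2.1 then false
  else if p.2.1 = [] then true
  else pvScan p.2.2 q.2.2
termination_by r.length
decreasing_by
  rename_i hsep
  by_cases hm : '/' ∈ r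
  · simp only [pvPartSlash, if_pos hm]
    exact pvDropTail_lt r hm
  · refine absurd ?_ hsep
    show (pvPartSlash r).2.1 = []
    simp [pvPartSlash, hm]

def path_matches_py_alt (route_pattern : String) (actual_path : String) : Bool :=
  let rp := pvRstripSlash route_pattern.toList
  let ap := pvRstripSlash actual_path.toList
  if PySem.Chars.isIn ['{'] rp && PySem.Chars.isIn ['}'] rp then
    let r := PySem.Chars.stripChars rp ['/']
    let a := PySem.Chars.stripChars ap ['/']
    if r = [] ∨ a = [] then decide (r = a) else pvScan r a
  else PySem.Chars.startswith ap rp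

-- ===== PRECONDITION & SPEC =====
def Spec_path_matches_py (route_pattern : String) (actual_path : String) (out : Bool) : Prop := out = path_matches_py_alt route_pattern actual_path
instance (route_pattern : String) (actual_path : String) (out : Bool) : Decidable (Spec_path_matches_py route_pattern actual_path out) := by unfold Spec_path_matches_py; infer_instance

-- ===== CLAIM =====
def Claim_equal_path_matches_py : Prop := ∀ (route_pattern : String) (actual_path : String), Dom_path_matches_py route_pattern actual_path → Spec_path_matches_py route_pattern actual_path (path_matches_py route_pattern actual_path)

-- ===== LEMMAS AND PROOFS =====
-- The natural recursion computed by splitOn on the single-char separator "/"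
def pvPieces (l : List Char) : List (List Char) :=
  if _h : '/' ∈ l then
    (l.takeWhile (fun c => c ≠ '/')) :: pvPieces ((l.dropWhile (fun c => c ≠ '/')).tail)
  else [l]
termination_by l.length
decreasing_by exact pvDropTail_lt l _h

theorem pvPieces_ne_nil (l : List Char) : pvPieces l ≠ [] := by
  unfold pvPieces; split <;> simp

theorem pvPieces_pos (l : List Char) (h : '/' ∈ l) :
    pvPieces l = (l.takeWhile (fun c => c ≠ '/')) :: pvPieces ((l.dropWhile (fun c => c ≠ '/')).tail) := by
  rw [pvPieces]; simp [h]

theorem pvPieces_neg (l : List Char) (h : '/' ∉ l) : pvPieces l = [l] := by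
  rw [pvPieces]; simp [h]

theorem pvSplitOn_go_eq (fuel : Nat) (l cur : List Char) (acc : List (List Char))
    (hf : l.length < fuel) :
    PySem.Chars.splitOn.go ['/'] fuel l cur acc
      = acc.reverse ++ List.modifyHead (fun x => cur.reverse ++ x) (pvPieces l) := by
  induction fuel generalizing l cur acc with
  | zero => omega
  | succ fuel ih =>
    cases l with
    | nil =>
      unfold PySem.Chars.splitOn.go
      rw [pvPieces_neg _ (by simp)]
      simp
    | cons c rest =>
      conv_lhs => unfold PySem.Chars.splitOn.go
      by_cases hc : c = '/'
      · subst hc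
        have hpre : ['/'].isPrefixOf ('/' :: rest) = true := by simp [List.isPrefixOf]
        rw [if_pos hpre]
        have hstep : List.drop (['/'] : List Char).length ('/' :: rest) = rest := by simp
        rw [hstep, ih _ _ _ (by simp at hf ⊢; omega)]
        rw [pvPieces_pos _ (List.mem_cons_self)]
        simp only [List.takeWhile, List.dropWhile]
        cases h2 : pvPieces rest <;> simp [h2]
      · have hpre : ['/'].isPrefixOf (c :: rest) = false := by
          simp [List.isPrefixOf]; exact fun h => absurd h.symm hc
        rw [if_neg (by simp [hpre])]
        rw [ih _ _ _ (by simp at hf ⊢; omega)]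
        have hmem : ('/' ∈ c :: rest) ↔ ('/' ∈ rest) := by
          constructor
          · intro h; rcases List.mem_cons.mp h with h | h
            · exact absurd h.symm hc
            · exact h
          · exact fun h => List.mem_cons_of_mem _ h
        by_cases hr : '/' ∈ rest
        · rw [pvPieces_pos _ hr, pvPieces_pos _ (hmem.mpr hr)]
          simp [List.takeWhile, List.dropWhile, hc]
        · rw [pvPieces_neg _ hr, pvPieces_neg _ (fun h => hr (hmem.mp h))]
          simp

theorem pvSplitOn_eq_pieces (l : List Char) : PySem.Chars.splitOn l ['/'] = pvPieces l := by
  show PySem.Chars.splitOn.go ['/'] (l.length + 1) l [] [] = _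
  rw [pvSplitOn_go_eq _ _ _ _ (by omega)]
  cases h : pvPieces l with
  | nil => exact absurd h (pvPieces_ne_nil l)
  | cons x t => simp

theorem pvScan_eq (r a : List Char) :
    pvScan r a =
      (if (pvPieces r).length ≠ (pvPieces a).length then false
       else pvALoop ((pvPieces r).zip (pvPieces a))) := by
  induction hn : r.length using Nat.strong_induction_on generalizing r a with
  | _ n ih =>
  subst hn
  rw [pvScan]
  by_cases hr : '/' ∈ r <;> by_cases ha : '/' ∈ a
  · rw [pvPieces_pos _ hr, pvPieces_pos _ ha]
    simp only [pvPartSlash, if_pos hr, if_pos ha]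
    rw [ih _ (pvDropTail_lt r hr) _ _ rfl]
    simp only [List.length_cons, List.zip_cons_cons, pvALoop]
    split_ifs <;> simp_all
  · rw [pvPieces_pos _ hr, pvPieces_neg _ ha]
    have := pvPieces_ne_nil ((r.dropWhile (fun c => c ≠ '/')).tail)
    simp only [pvPartSlash, if_pos hr, if_neg ha]
    cases h : pvPieces ((r.dropWhile (fun c => c ≠ '/')).tail) with
    | nil => exact absurd h this
    | cons x t => split_ifs <;> simp_all
  · rw [pvPieces_neg _ hr, pvPieces_pos _ ha]
    have := pvPieces_ne_nil ((a.dropWhile (fun c => c ≠ '/')).tail)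
    simp only [pvPartSlash, if_neg hr, if_pos ha]
    cases h : pvPieces ((a.dropWhile (fun c => c ≠ '/')).tail) with
    | nil => exact absurd h this
    | cons x t => split_ifs <;> simp_all
  · rw [pvPieces_neg _ hr, pvPieces_neg _ ha]
    simp only [pvPartSlash, if_neg hr, if_neg ha]
    simp only [List.length_cons, List.zip_cons_cons, pvALoop]
    split_ifs <;> simp_all [pvALoop]

theorem pvSegs_eq (l : List Char) :
    pvSegs l = (if PySem.Chars.stripChars l ['/'] = [] then []
                else pvPieces (PySem.Chars.stripChars l ['/'])) := by
  by_cases h : PySem.Chars.stripChars l ['/'] = []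
  · simp [pvSegs, h]
  · simp [pvSegs, h, pvSplitOn_eq_pieces]

theorem pvTop_eq (r a : List Char) :
    (if ((if r = [] then [] else pvPieces r).length ≠ (if a = [] then [] else pvPieces a).length)
     then false
     else pvALoop (((if r = [] then [] else pvPieces r)).zip (if a = [] then [] else pvPieces a)))
    = (if r = [] ∨ a = [] then decide (r = a) else pvScan r a) := by
  by_cases hre : r = [] <;> by_cases hae : a = []
  · simp [hre, hae, pvALoop]
  · have := pvPieces_ne_nil a
    cases h : pvPieces a with
    | nil => exact absurd h this
    | cons x t => simp_all
  · have := pvPieces_ne_nil r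
    cases h : pvPieces r with
    | nil => exact absurd h this
    | cons x t => simp_all
  · simp [hre, hae, pvScan_eq]

-- ===== VERDICT =====
theorem path_matches_py_spec : Claim_equal_path_matches_py := by
  intro route_pattern actual_path _
  unfold Spec_path_matches_py path_matches_py path_matches_py_alt
  by_cases hb : (PySem.Chars.isIn ['{'] (pvRstripSlash route_pattern.toList)
      && PySem.Chars.isIn ['}'] (pvRstripSlash route_pattern.toList)) = true
  · simp only [hb, if_true, pvSegs_eq]
    exact pvTop_eq _ _
  · simp only [hb]; rfl
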